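-- pv_equiv track=rewrite | github.com/miko7879/programming_problems | Interview Bit/Arrays/pickFromBothSides.py | pickFromBothSides
-- ===== SOURCE A (Python) =====
-- def pickFromBothSides(A, B):
--
--         i, j = B - 1, len(A) - 1
--
--         curr_s = sum(A[:B])
--
--         max_s = curr_s
--
--         while i >= 0:
--             curr_s = curr_s - A[i] + A[j]
--             max_s = max(max_s, curr_s)
--             i -= 1
--             j -= 1
--
--         return max_s
-- ===== SOURCE B (Python) =====
-- def pickFromBothSides(A, B):
--     left = [0]
--     for x in A[:B]:
--         left.append(left[-1] + x)
--     right = [0]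
--     for x in reversed(A[len(A) - B:]):
--         right.append(right[-1] + x)
--     best = left[-1] + right[0]
--     for k in range(B):
--         best = max(best, left[k] + right[B - k])
--     return best
-- ===== Notes on version B (the rewrite author's own statement) =====
-- stated objective: alternative
-- what changed: Replaces the sliding-window update loop with prefix/suffix sum tables and a direct maximum over all ways to split the B picks between the two ends.
import Mathlib
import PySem

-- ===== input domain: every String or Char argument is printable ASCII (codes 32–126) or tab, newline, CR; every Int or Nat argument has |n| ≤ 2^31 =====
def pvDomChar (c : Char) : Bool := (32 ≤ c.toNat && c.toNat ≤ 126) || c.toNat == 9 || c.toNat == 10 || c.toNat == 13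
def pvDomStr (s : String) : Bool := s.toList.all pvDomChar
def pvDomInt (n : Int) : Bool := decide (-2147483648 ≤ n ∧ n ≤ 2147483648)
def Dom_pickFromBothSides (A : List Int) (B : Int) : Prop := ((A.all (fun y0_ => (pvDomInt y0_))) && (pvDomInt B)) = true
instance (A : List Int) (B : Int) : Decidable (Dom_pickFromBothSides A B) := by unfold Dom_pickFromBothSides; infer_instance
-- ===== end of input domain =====

-- B replaces A's sliding-window update loop by prefix/suffix sum tables and a direct
-- maximum over all ways to split the B picks between the two ends (alternative decomposition, same cost).

-- ===== PORT A =====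
-- the while loop: state (i, j, curr_s, max_s); pyGet? = Python indexing (none = IndexError)
def pickLoopA (A : List Int) (i j curr maxs : Int) : Option Int :=
  if h : 0 ≤ i then
    match PySem.List.pyGet? A i, PySem.List.pyGet? A j with
    | some ai, some aj =>
        let c := curr - ai + aj
        pickLoopA A (i - 1) (j - 1) c (max maxs c)
    | _, _ => none
  else some maxs
termination_by (i + 1).toNat
decreasing_by omega

def pickFromBothSides (A : List Int) (B : Int) : Int :=
  let i := B - 1
  let j := (A.length : Int) - 1
  let curr := (PySem.List.slice A none (some B)).sum
  (pickLoopA A i j curr curr).getD 0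

-- ===== PORT B =====
-- left/right tables: for x in …: acc.append(acc[-1] + x)
def prefixLoop (xs : List Int) (acc : List Int) : List Int :=
  match xs with
  | [] => acc
  | x :: rest => prefixLoop rest (acc ++ [PySem.List.pyGetD acc (-1) 0 + x])

-- left[k] + right[B-k] (none = IndexError)
def candB (left right : List Int) (B k : Int) : Option Int :=
  match PySem.List.pyGet? left k, PySem.List.pyGet? right (B - k) with
  | some l, some r => some (l + r)
  | _, _ => none

-- for k in range(B): best = max(best, left[k] + right[B-k])
def maxGenAux (left right : List Int) (B : Int) : List Int → Int → Option Int
  | [], best => some best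
  | k :: rest, best =>
    match candB left right B k with
    | some c => maxGenAux left right B rest (max best c)
    | none => none

def pickFromBothSides_alt (A : List Int) (B : Int) : Int :=
  let left := prefixLoop (PySem.List.slice A none (some B)) [0]
  let right := prefixLoop ((PySem.List.slice A (some ((A.length : Int) - B)) none).reverse) [0]
  let best := PySem.List.pyGetD left (-1) 0 + PySem.List.pyGetD right 0 0
  (maxGenAux left right B (PySem.List.pyRange 0 B 1) best).getD 0

-- ===== PRECONDITION & SPEC =====
-- Pre_ excludes exactly B > len(A), where A raises IndexError (and B raises too).
def Pre_pickFromBothSides (A : List Int) (B : Int) : Prop := B ≤ A.length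
instance (A : List Int) (B : Int) : Decidable (Pre_pickFromBothSides A B) := by
  unfold Pre_pickFromBothSides; infer_instance

def pvWitness_pickFromBothSides : List Int × Int := ([1, 2, 3], 2)

def Spec_pickFromBothSides (A : List Int) (B : Int) (out : Int) : Prop := out = pickFromBothSides_alt A B
instance (A : List Int) (B : Int) (out : Int) : Decidable (Spec_pickFromBothSides A B out) := by unfold Spec_pickFromBothSides; infer_instance

-- ===== CLAIM (what is proved, stated in full; the proofs are below) =====
def Claim_equal_pickFromBothSides : Prop := ∀ (A : List Int) (B : Int), Dom_pickFromBothSides A B → Pre_pickFromBothSides A B → Spec_pickFromBothSides A B (pickFromBothSides A B)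

-- ===== LEMMAS AND PROOFS =====

-- candidate t = take the first (b-t) and the last t elements
def gcand (A : List Int) (b t : Nat) : Int :=
  (A.take (b - t)).sum + (A.drop (A.length - t)).sum

lemma gcand_step (A : List Int) (b t : Nat) (hb : b ≤ A.length) (ht : t < b) :
    gcand A b (t + 1) =
      gcand A b t - A[b - 1 - t]'(by omega) + A[A.length - 1 - t]'(by omega) := by
  unfold gcand
  have h1 : b - t = (b - 1 - t) + 1 := by omega
  have h2 : A.length - t = (A.length - 1 - t) + 1 := by omega
  have e3 : b - (t + 1) = b - 1 - t := by omega
  have e2 : A.length - (t + 1) = A.length - 1 - t := by omega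
  rw [e3, e2, h1, h2, List.take_add_one,
      List.drop_eq_getElem_cons (show A.length - 1 - t < A.length by omega),
      List.getElem?_eq_getElem (show b - 1 - t < A.length by omega)]
  simp only [Option.toList_some, List.sum_append, List.sum_cons, List.sum_nil]
  ring

lemma loopA_eq (A : List Int) (b : Nat) (hb : b ≤ A.length) :
    ∀ (r t : Nat), t + r = b → ∀ (m : Int),
      pickLoopA A ((b : Int) - 1 - t) ((A.length : Int) - 1 - t) (gcand A b t) m
        = some (List.foldl max m ((List.range' (t + 1) r).map (gcand A b))) := by
  intro r
  induction r with
  | zero =>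
    intro t ht m
    rw [pickLoopA, dif_neg (show ¬ (0 ≤ (b : Int) - 1 - (t : Int)) by omega)]
    simp
  | succ r ih =>
    intro t ht m
    rw [pickLoopA]
    have hi : (0 ≤ (b : Int) - 1 - t) := by omega
    have hci : (b : Int) - 1 - t = ((b - 1 - t : Nat) : Int) := by omega
    have hcj : (A.length : Int) - 1 - t = ((A.length - 1 - t : Nat) : Int) := by omega
    rw [dif_pos hi, hci, hcj, PySem.List.pyGet?_natCast, PySem.List.pyGet?_natCast,
        List.getElem?_eq_getElem (by omega : b - 1 - t < A.length),
        List.getElem?_eq_getElem (by omega : A.length - 1 - t < A.length)]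
    have hcurr : gcand A b t - A[b - 1 - t]'(by omega) + A[A.length - 1 - t]'(by omega)
        = gcand A b (t + 1) := (gcand_step A b t hb (by omega)).symm
    have hi' : ((b - 1 - t : Nat) : Int) - 1 = (b : Int) - 1 - (t + 1) := by omega
    have hj' : ((A.length - 1 - t : Nat) : Int) - 1 = (A.length : Int) - 1 - (t + 1) := by omega
    simp only [hcurr, hi', hj']
    have hrec := ih (t + 1) (by omega) (max m (gcand A b (t + 1)))
    push_cast at hrec ⊢
    rw [hrec, List.range'_succ]
    simp

-- characterization of port A under Pre_
lemma portA_eq (A : List Int) (b : Nat) (hb : b ≤ A.length) :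
    pickFromBothSides A (b : Int)
      = List.foldl max (gcand A b 0) ((List.range' 1 b).map (gcand A b)) := by
  simp only [pickFromBothSides]
  have hs : PySem.List.slice A none (some (b : Int)) = A.take b :=
    PySem.List.slice_to_natCast A b
  have hg0 : (A.take b).sum = gcand A b 0 := by
    unfold gcand; simp
  simp only [hs, hg0]
  have h := loopA_eq A b hb b 0 (Nat.zero_add b) (gcand A b 0)
  simp only [Nat.cast_zero, sub_zero, Nat.zero_add] at h
  rw [h]
  simp

lemma prefixLoop_spec : ∀ (xs pre : List Int) (s : Int),
    prefixLoop xs (pre ++ [s])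
      = (pre ++ [s]) ++ (List.range' 1 xs.length).map (fun k => s + (xs.take k).sum) := by
  intro xs
  induction xs with
  | nil => intro pre s; simp [prefixLoop]
  | cons x rest ih =>
    intro pre s
    rw [prefixLoop, PySem.List.pyGetD_neg_one_append_singleton,
        show pre ++ [s] ++ [s + x] = (pre ++ [s]) ++ [s + x] from by simp,
        ih (pre ++ [s]) (s + x)]
    have hmap : (List.range' 2 rest.length).map (fun k => s + ((x :: rest).take k).sum)
        = (List.range' 1 rest.length).map (fun k => (s + x) + (rest.take k).sum) := by
      rw [List.range'_eq_map_range, List.range'_eq_map_range, List.map_map, List.map_map]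
      apply List.map_congr_left
      intro i _
      simp only [Function.comp_apply]
      rw [show 2 + i = (1 + i) + 1 from by omega, List.take_succ_cons, List.sum_cons]
      ring
    rw [List.length_cons, List.range'_succ, List.map_cons, ← hmap]
    simp

-- table lookups
lemma prefix_get (xs : List Int) (k : Nat) (hk : k ≤ xs.length) :
    PySem.List.pyGet? (prefixLoop xs [0]) ((k : Nat) : Int) = some ((xs.take k).sum) := by
  have h := prefixLoop_spec xs [] 0
  simp only [List.nil_append] at h
  rw [h, PySem.List.pyGet?_natCast]
  cases k with
  | zero => simp
  | succ k' =>
    rw [List.singleton_append, List.getElem?_cons_succ, List.getElem?_map,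
        List.getElem?_range' (by simpa using (by omega : k' < xs.length))]
    simp [Nat.add_comm]

lemma left_get (A : List Int) (b k : Nat) (hb : b ≤ A.length) (hk : k ≤ b) :
    PySem.List.pyGet? (prefixLoop (A.take b) [0]) ((k : Nat) : Int)
      = some ((A.take k).sum) := by
  rw [prefix_get (A.take b) k (by rw [List.length_take]; exact le_min hk (hk.trans hb))]
  rw [List.take_take, min_eq_left hk]

lemma right_get (A : List Int) (b m : Nat) (hb : b ≤ A.length) (hm : m ≤ b) :
    PySem.List.pyGet? (prefixLoop ((A.drop (A.length - b)).reverse) [0]) ((m : Nat) : Int)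
      = some ((A.drop (A.length - m)).sum) := by
  have hlen : (A.drop (A.length - b)).reverse.length = b := by simp; omega
  have hx : (A.drop (A.length - b)).reverse.take m = (A.drop (A.length - m)).reverse := by
    rw [List.take_reverse]
    congr 1
    rw [List.length_drop, List.drop_drop]
    congr 1
    omega
  rw [prefix_get _ m (by rw [hlen]; exact hm), hx, List.sum_reverse]

lemma candB_eq (A : List Int) (b k : Nat) (hb : b ≤ A.length) (hk : k ≤ b) :
    candB (prefixLoop (PySem.List.slice A none (some (b : Int))) [0])
          (prefixLoop ((PySem.List.slice A (some ((A.length : Int) - (b : Int))) none).reverse) [0])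
          (b : Int) ((k : Nat) : Int)
      = some (gcand A b (b - k)) := by
  have hs1 : PySem.List.slice A none (some (b : Int)) = A.take b :=
    PySem.List.slice_to_natCast A b
  have hs2 : PySem.List.slice A (some ((A.length : Int) - (b : Int))) none
      = A.drop (A.length - b) := by
    rw [PySem.List.slice_from A (a := (A.length : Int) - (b : Int)) (by omega)]
    congr 1
    omega
  have hbk : (b : Int) - (k : Int) = ((b - k : Nat) : Int) := by omega
  unfold candB
  rw [hs1, hs2, hbk, left_get A b k hb hk, right_get A b (b - k) hb (by omega)]
  unfold gcand
  have hkk : b - (b - k) = k := by omega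
  rw [hkk]

lemma prefix_head (xs : List Int) :
    PySem.List.pyGetD (prefixLoop xs [0]) 0 0 = 0 := by
  have h := prefixLoop_spec xs [] 0
  simp only [List.nil_append] at h
  rw [h, List.singleton_append, PySem.List.pyGetD_zero_cons]

lemma prefix_last (xs : List Int) :
    PySem.List.pyGetD (prefixLoop xs [0]) (-1) 0 = xs.sum := by
  cases xs with
  | nil => decide
  | cons y ys =>
    have h := prefixLoop_spec (y :: ys) [] 0
    simp only [List.nil_append] at h
    rw [h]
    simp only [List.length_cons, List.range'_concat, List.map_append, List.map_cons,
      List.map_nil, ← List.append_assoc]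
    rw [PySem.List.pyGetD_neg_one_append_singleton]
    rw [List.take_of_length_le (by simp only [List.length_cons]; omega)]
    simp

lemma maxGen_aux_eq (A : List Int) (b : Nat) (hb : b ≤ A.length) :
    ∀ (r t : Nat), t + r = b → ∀ (acc : Int),
      maxGenAux (prefixLoop (PySem.List.slice A none (some (b : Int))) [0])
                (prefixLoop ((PySem.List.slice A (some ((A.length : Int) - (b : Int))) none).reverse) [0])
                (b : Int) (PySem.List.pyRange ((t : Nat) : Int) ((b : Int)) 1) acc
        = some (List.foldl max acc ((List.range' t r).map (fun k => gcand A b (b - k)))) := by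
  intro r
  induction r with
  | zero =>
    intro t ht acc
    rw [PySem.List.pyRange_one_eq_nil (by omega)]
    simp [maxGenAux]
  | succ r ih =>
    intro t ht acc
    rw [PySem.List.pyRange_one_cons (by omega)]
    rw [maxGenAux]
    rw [candB_eq A b t hb (by omega)]
    have hrec := ih (t + 1) (by omega) (max acc (gcand A b (b - t)))
    push_cast at hrec ⊢
    rw [hrec, List.range'_succ]
    simp

-- characterization of port B for nonnegative B under Pre_
lemma portB_eq (A : List Int) (b : Nat) (hb : b ≤ A.length) :
    pickFromBothSides_alt A (b : Int)
      = List.foldl max (gcand A b 0) ((List.range' 0 b).map (fun k => gcand A b (b - k))) := by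
  simp only [pickFromBothSides_alt]
  rw [prefix_last, prefix_head]
  have hm := maxGen_aux_eq A b hb b 0 (Nat.zero_add b)
      ((PySem.List.slice A none (some (b : Int))).sum + 0)
  push_cast at hm ⊢
  rw [hm]
  have hg0 : (PySem.List.slice A none (some (b : Int))).sum + 0 = gcand A b 0 := by
    rw [PySem.List.slice_to_natCast A b]
    unfold gcand
    simp
  rw [hg0]
  simp

-- max-fold algebra
lemma foldl_max_pullout : ∀ (l : List Int) (c x : Int),
    List.foldl max (max c x) l = max c (List.foldl max x l) := by
  intro l
  induction l with
  | nil => intro c x; rfl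
  | cons y l ih =>
    intro c x
    simp only [List.foldl_cons, max_assoc]
    exact ih c (max x y)

lemma foldl_max_reverse : ∀ (l : List Int) (a : Int),
    List.foldl max a l.reverse = List.foldl max a l := by
  intro l
  induction l with
  | nil => intro a; rfl
  | cons x l ih =>
    intro a
    rw [List.reverse_cons, List.foldl_append, ih]
    simp only [List.foldl_cons, List.foldl_nil]
    rw [max_comm a x, foldl_max_pullout]
    exact max_comm _ _

lemma map_down0_eq (g : Nat → Int) (b : Nat) :
    (List.range' 0 b).map (fun k => g (b - k)) = ((List.range' 1 b).map g).reverse := by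
  rw [← List.map_reverse, List.reverse_range', List.map_map,
      show List.range' 0 b = List.range b from (List.range_eq_range').symm]
  apply List.map_congr_left
  intro i _
  simp only [Function.comp_apply]
  congr 1
  omega

-- ===== VERDICT (by name: the statement is the Claim_ definition above) =====
theorem pickFromBothSides_spec : Claim_equal_pickFromBothSides := by
  intro A B _dom hpre
  replace hpre : B ≤ (A.length : Int) := hpre
  unfold Spec_pickFromBothSides
  by_cases hB : 0 ≤ B
  · obtain ⟨b, rfl⟩ : ∃ b : Nat, B = (b : Int) := ⟨B.toNat, by omega⟩
    have hb : b ≤ A.length := by exact_mod_cast hpre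
    rw [portA_eq A b hb, portB_eq A b hb, map_down0_eq (gcand A b) b, foldl_max_reverse]
  · simp only [pickFromBothSides, pickFromBothSides_alt]
    rw [pickLoopA, dif_neg (by omega : ¬ (0 ≤ B - 1))]
    rw [PySem.List.pyRange_one_eq_nil (by omega : B ≤ 0)]
    rw [maxGenAux]
    rw [prefix_last, prefix_head]
    simp
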